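-- pv_equiv track=rewrite | github.com/autosome-ru/postibis | libis/dinucl_shuffle.py | compute_count
-- ===== SOURCE A (Python) =====
-- LETTERS = ["A", "C", "G", "T", "N"]
--
-- def compute_count(s):
--     # P. Clote, Oct 2003
--     # Initialize lists and mono- and dinucleotide dictionaries
--     dct = {i: list() for i in LETTERS}
--     nucl_list = list(LETTERS)
--     nucl_cnt = dict()
--     dinucl_cnt = dict()
--     for x in nucl_list:
--         nucl_cnt[x] = 0
--         dinucl_cnt[x] = {}
--         for y in nucl_list:
--             dinucl_cnt[x][y] = 0
--
--     nucl_cnt[s[0]] = 1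
--     nucl_total = 1
--     dinucl_total = 0
--     for i in range(len(s) - 1):
--
--         x = s[i]
--         y = s[i + 1]
--
--         dct[x].append(y)
--         nucl_cnt[y] += 1
--         nucl_total += 1
--         dinucl_cnt[x][y] += 1
--         dinucl_total += 1
--     assert nucl_total == len(s)
--     assert dinucl_total == len(s) - 1
--     return dinucl_cnt, dct
-- ===== SOURCE B (Python) =====
-- LETTERS = ["A", "C", "G", "T", "N"]
--
-- def compute_count(s):
--     # build-then-aggregate: one pass builds only the adjacency lists,
--     # dinucleotide counts are derived afterwards from each letter's bucket
--     dct = {x: [] for x in LETTERS}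
--     for x, y in zip(s, s[1:]):
--         dct[x].append(y)
--     dinucl_cnt = {x: {y: dct[x].count(y) for y in LETTERS} for x in LETTERS}
--     return dinucl_cnt, dct
-- ===== Notes on version B (the rewrite author's own statement) =====
-- stated objective: simpler
-- what changed: A's single fused loop that updates three dicts (adjacency lists, mono- and dinucleotide counters) at once is replaced by a build-then-aggregate decomposition: one pass builds only the adjacency lists, and the dinucleotide counts are derived afterwards by counting each letter's bucket; the never-returned nucl_cnt bookkeeping and the asserts disappear.
import Mathlib
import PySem

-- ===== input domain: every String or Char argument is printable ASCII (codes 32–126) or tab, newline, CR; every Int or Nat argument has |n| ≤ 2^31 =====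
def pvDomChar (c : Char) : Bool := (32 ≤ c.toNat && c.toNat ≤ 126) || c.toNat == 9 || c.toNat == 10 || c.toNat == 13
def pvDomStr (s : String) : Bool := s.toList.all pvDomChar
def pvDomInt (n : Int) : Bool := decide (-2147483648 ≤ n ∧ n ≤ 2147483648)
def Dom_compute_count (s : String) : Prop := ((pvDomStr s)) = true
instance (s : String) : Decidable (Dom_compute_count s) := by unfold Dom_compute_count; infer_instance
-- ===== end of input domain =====

-- B replaces A's single fused loop (three dicts updated at once) by a build-then-aggregate
-- decomposition: one pass builds only the adjacency lists, the dinucleotide counts are then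
-- derived by counting each letter's bucket; the unreturned nucl_cnt bookkeeping disappears.


-- ===== PORT A =====
def LETTERS : List String := ["A", "C", "G", "T", "N"]

-- dict value update in place (Python `d[k] = f(d[k])` on an existing key; no-op if absent —
-- inside Pre_ the key is always present, a missing key is Python's KeyError)
def updA {V : Type} (k : String) (f : V → V) : List (String × V) → List (String × V)
  | [] => []
  | (a, v) :: rest => if a = k then (a, f v) :: rest else (a, v) :: updA k f rest

-- one iteration of A's fused loop body (dct, nucl_cnt, dinucl_cnt updated together)
def stepA (st : (List (String × List String)) × (List (String × Int)) × (List (String × List (String × Int))))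
    (x y : String) :
    (List (String × List String)) × (List (String × Int)) × (List (String × List (String × Int))) :=
  (updA x (fun l => l ++ [y]) st.1,
   updA y (fun n => n + 1) st.2.1,
   updA x (updA y (fun n => n + 1)) st.2.2)

-- `for i in range(len(s)-1): x = s[i]; y = s[i+1]; …` as structural recursion over consecutive chars
def loopA (st : (List (String × List String)) × (List (String × Int)) × (List (String × List (String × Int)))) :
    List Char → (List (String × List String)) × (List (String × Int)) × (List (String × List (String × Int)))
  | x :: y :: rest => loopA (stepA st (String.ofList [x]) (String.ofList [y])) (y :: rest)
  | _ => st

def compute_count (s : String) : (List (String × List (String × Int))) × (List (String × List String)) :=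
  let dct := LETTERS.map (fun x => (x, ([] : List String)))
  let nucl := LETTERS.map (fun x => (x, (0 : Int)))
  let din := LETTERS.map (fun x => (x, LETTERS.map (fun y => (y, (0 : Int)))))
  -- nucl_cnt[s[0]] = 1 (IndexError on "" is excluded by Pre_; nucl_cnt is never returned)
  let nucl := match s.toList with
    | c :: _ => updA (String.ofList [c]) (fun _ => (1 : Int)) nucl
    | [] => nucl
  let fin := loopA (dct, nucl, din) s.toList
  -- the two asserts compare the loop counters with len(s) and always hold when the loop completes
  (fin.2.2, fin.1)

-- ===== PORT B =====
def compute_count_alt (s : String) : (List (String × List (String × Int))) × (List (String × List String)) :=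
  let cs := s.toList
  let dct := (cs.zip cs.tail).foldl
    (fun d p => updA (String.ofList [p.1]) (fun l => l ++ [String.ofList [p.2]]) d)
    (LETTERS.map (fun x => (x, ([] : List String))))
  let din := LETTERS.map (fun x => (x,
    LETTERS.map (fun y => (y, ((((dct.lookup x).getD []).count y : Nat) : Int)))))
  (din, dct)

-- ===== PRECONDITION & SPEC =====
-- Pre_ excludes exactly the inputs on which A raises: the empty string (IndexError at s[0]) and
-- strings of length ≥ 2 containing a character that is not one of the five letters A, C, G, T, N (KeyError in the loop).
def Pre_compute_count (s : String) : Prop :=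
  s.toList ≠ [] ∧ (s.toList.length = 1 ∨ ∀ c ∈ s.toList, c ∈ (['A', 'C', 'G', 'T', 'N'] : List Char))
instance (s : String) : Decidable (Pre_compute_count s) := by unfold Pre_compute_count; infer_instance

def pvWitness_compute_count : String := "A"


def Spec_compute_count (s : String) (out : (List (String × List (String × Int))) × (List (String × List String))) : Prop := out = compute_count_alt s
instance (s : String) (out : (List (String × List (String × Int))) × (List (String × List String))) : Decidable (Spec_compute_count s out) := by unfold Spec_compute_count; infer_instance

-- ===== CLAIM (what is proved, stated in full; the proofs are below) =====
def Claim_equal_compute_count : Prop := ∀ (s : String), Dom_compute_count s → Pre_compute_count s → Spec_compute_count s (compute_count s)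

-- ===== LEMMAS AND PROOFS =====

-- abbreviations for the proof: a dict over LETTERS as a function, and the derived count dict
def mkD (g : String → List String) : List (String × List String) :=
  LETTERS.map (fun x => (x, g x))
def mkM (g : String → List String) : List (String × List (String × Int)) :=
  LETTERS.map (fun x => (x, LETTERS.map (fun y => (y, (((g x).count y : Nat) : Int)))))
def gupd (g : String → List String) (x y : String) : String → List String :=
  fun z => if z = x then g z ++ [y] else g z

lemma updA_map {V : Type} (l : List String) (hnd : l.Nodup) (g : String → V) (x : String) (f : V → V) :
    updA x f (l.map fun z => (z, g z)) = l.map (fun z => (z, if z = x then f (g z) else g z)) := by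
  induction l with
  | nil => rfl
  | cons a t ih =>
    rcases List.nodup_cons.mp hnd with ⟨ha, hnt⟩
    by_cases hax : a = x
    · subst hax
      have hmap : t.map (fun z => (z, if z = a then f (g z) else g z)) = t.map (fun z => (z, g z)) :=
        List.map_congr_left (fun z hz => by
          have : z ≠ a := fun h => ha (h ▸ hz)
          simp [this])
      simp [updA, hmap]
    · simp only [List.map_cons, updA, if_neg hax, ih hnt]

lemma loopA_eq_foldl (cs : List Char) (st : (List (String × List String)) × (List (String × Int)) × (List (String × List (String × Int)))) :
    loopA st cs = (cs.zip cs.tail).foldl (fun st p => stepA st (String.ofList [p.1]) (String.ofList [p.2])) st := by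
  induction cs generalizing st with
  | nil => rfl
  | cons x t ih =>
    cases t with
    | nil => rfl
    | cons y r => simpa [loopA] using ih (stepA st (String.ofList [x]) (String.ofList [y]))

lemma LETTERS_nodup : LETTERS.Nodup := by decide

lemma stepA_mk (g : String → List String) (n : List (String × Int)) (x y : String) :
    stepA (mkD g, n, mkM g) x y = (mkD (gupd g x y), updA y (fun n => n + 1) n, mkM (gupd g x y)) := by
  unfold stepA mkD mkM gupd
  refine Prod.ext ?_ (Prod.ext rfl ?_)
  · simpa using updA_map LETTERS LETTERS_nodup g x (fun l => l ++ [y])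
  · simp only
    rw [updA_map LETTERS LETTERS_nodup _ x]
    apply List.map_congr_left
    intro z _
    by_cases hz : z = x
    · simp only [hz, if_true]
      congr 1
      rw [updA_map LETTERS LETTERS_nodup _ y]
      apply List.map_congr_left
      intro y' _
      by_cases hyy : y' = y
      · simp [hyy, List.count_append]
      · have : List.count y' [y] = 0 := by
          simp [List.count_singleton]
          exact fun h => hyy h.symm
        simp [hyy, List.count_append, this]
    · simp [hz]

lemma inv_foldl (P : List (Char × Char)) :
    ∀ (g : String → List String) (n : List (String × Int)),
      P.foldl (fun st p => stepA st (String.ofList [p.1]) (String.ofList [p.2])) (mkD g, n, mkM g)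
        = (mkD (P.foldl (fun g p => gupd g (String.ofList [p.1]) (String.ofList [p.2])) g),
           (P.foldl (fun st p => stepA st (String.ofList [p.1]) (String.ofList [p.2])) (mkD g, n, mkM g)).2.1,
           mkM (P.foldl (fun g p => gupd g (String.ofList [p.1]) (String.ofList [p.2])) g)) := by
  induction P with
  | nil => intro g n; rfl
  | cons p P ih =>
    intro g n
    simp only [List.foldl_cons, stepA_mk g n]
    exact ih _ _

lemma bfold_mk (P : List (Char × Char)) :
    ∀ g : String → List String,
      P.foldl (fun d p => updA (String.ofList [p.1]) (fun l => l ++ [String.ofList [p.2]]) d) (mkD g)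
        = mkD (P.foldl (fun g p => gupd g (String.ofList [p.1]) (String.ofList [p.2])) g) := by
  induction P with
  | nil => intro g; rfl
  | cons p P ih =>
    intro g
    simp only [List.foldl_cons]
    rw [show updA (String.ofList [p.1]) (fun l => l ++ [String.ofList [p.2]]) (mkD g)
          = mkD (gupd g (String.ofList [p.1]) (String.ofList [p.2])) from by
        unfold mkD gupd
        simpa using updA_map LETTERS LETTERS_nodup g (String.ofList [p.1]) (fun l => l ++ [String.ofList [p.2]])]
    exact ih _

lemma lookup_mkD (g : String → List String) (x : String) (hx : x ∈ LETTERS) :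
    ((mkD g).lookup x).getD [] = g x := by
  fin_cases hx <;> rfl

-- ===== VERDICT (by name: the statement is the Claim_ definition above) =====
theorem compute_count_spec : Claim_equal_compute_count := by
  intro s _ _
  unfold Spec_compute_count compute_count compute_count_alt
  have hD0 : (LETTERS.map (fun x => (x, ([] : List String)))) = mkD (fun _ => []) := rfl
  have hM0 : (LETTERS.map (fun x => (x, LETTERS.map fun y => (y, (0 : Int))))) = mkM (fun _ => []) := by
    unfold mkM; simp
  simp only [loopA_eq_foldl, hD0, hM0]
  rw [inv_foldl, bfold_mk]
  dsimp only
  refine Prod.ext ?_ rfl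
  simp only [mkM]
  apply List.map_congr_left
  intro x hx
  rw [lookup_mkD _ _ hx]
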